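-- pv_equiv track=rewrite | github.com/Chocoda/StrawberriesTheGame | Other/uczenie.py | cm_row_sums
-- ===== SOURCE A (Python) =====
-- def cm_row_sums(matrix, width):
--     height = len(matrix)// width
--     lista = [None] * height
--     for row in range (height):
--         suma = 0
--         for col in range (width):
--             suma += matrix[row+col*height]
--         lista [row] = suma
--
--     return lista
-- ===== SOURCE B (Python) =====
-- def cm_row_sums(matrix, width):
--     height = len(matrix) // width
--     if height <= 0:
--         return []
--     result = [0] * height
--     for c in range(width):
--         col = matrix[c * height:(c + 1) * height]
--         result = [s + x for s, x in zip(result, col)]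
--     return result
-- ===== Notes on version B (the rewrite author's own statement) =====
-- stated objective: alternative
-- what changed: B replaces A's nested row/col loops with per-element index arithmetic by a column-wise pass: it slices each stored column out of the flat list and accumulates it into the result with an element-wise zip-add, so the inner index computation row+col*height disappears.
import Mathlib
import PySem

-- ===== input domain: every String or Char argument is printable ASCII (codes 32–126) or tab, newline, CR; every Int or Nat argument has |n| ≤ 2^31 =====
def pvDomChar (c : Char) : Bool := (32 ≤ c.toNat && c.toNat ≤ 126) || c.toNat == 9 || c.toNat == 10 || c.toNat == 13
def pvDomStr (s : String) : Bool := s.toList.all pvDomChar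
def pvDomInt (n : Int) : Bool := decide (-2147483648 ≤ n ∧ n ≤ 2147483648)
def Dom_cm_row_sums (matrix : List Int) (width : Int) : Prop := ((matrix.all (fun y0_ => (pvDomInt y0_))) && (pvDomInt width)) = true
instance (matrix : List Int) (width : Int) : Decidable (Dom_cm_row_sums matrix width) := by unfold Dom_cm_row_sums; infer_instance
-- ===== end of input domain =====

-- B sums each stored column into the result by slice + element-wise zip-add instead of A's
-- nested row/col loops with index arithmetic; same cost, different decomposition.

-- ===== PORT A =====
-- '[None] * height' is modeled as 'List.replicate height.toNat 0': every slot is overwritten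
-- before being read, so the placeholder value never reaches the output.
-- 'matrix[row+col*height]' via pyGetD (the index is always in range when the loop runs).
def cm_row_sums (matrix : List Int) (width : Int) : List Int :=
  let height : Int := PySem.Int.floordiv (matrix.length : Int) width
  (PySem.List.pyRange 0 height 1).foldl
    (fun lista row =>
      let suma : Int :=
        (PySem.List.pyRange 0 width 1).foldl
          (fun suma col => suma + PySem.List.pyGetD matrix (row + col * height) 0) 0
      lista.set row.toNat suma)
    (List.replicate height.toNat 0)

-- ===== PORT B =====
def cm_row_sums_alt (matrix : List Int) (width : Int) : List Int :=
  let height : Int := PySem.Int.floordiv (matrix.length : Int) width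
  if height ≤ 0 then [] else
  (PySem.List.pyRange 0 width 1).foldl
    (fun result c =>
      let col := PySem.List.slice matrix (some (c * height)) (some ((c + 1) * height))
      (result.zip col).map (fun p => p.1 + p.2))
    (List.replicate height.toNat 0)

-- ===== PRECONDITION & SPEC =====
-- Pre_ excludes exactly width = 0, where Python raises ZeroDivisionError in both A and B.
def Pre_cm_row_sums (matrix : List Int) (width : Int) : Prop := width ≠ 0
instance (matrix : List Int) (width : Int) : Decidable (Pre_cm_row_sums matrix width) := by
  unfold Pre_cm_row_sums; infer_instance

def pvWitness_cm_row_sums : List Int × Int := ([1, 2, 3, 4], 2)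

def Spec_cm_row_sums (matrix : List Int) (width : Int) (out : List Int) : Prop := out = cm_row_sums_alt matrix width
instance (matrix : List Int) (width : Int) (out : List Int) : Decidable (Spec_cm_row_sums matrix width out) := by unfold Spec_cm_row_sums; infer_instance

-- ===== CLAIM (what is proved, stated in full; the proofs are below) =====
def Claim_equal_cm_row_sums : Prop := ∀ (matrix : List Int) (width : Int), Dom_cm_row_sums matrix width → Pre_cm_row_sums matrix width → Spec_cm_row_sums matrix width (cm_row_sums matrix width)

-- ===== LEMMAS AND PROOFS =====

-- Writing φ r into slot r, for r = 0..n-1, fills the first n slots with φ.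
theorem pv_set_fold (φ : Nat → Int) : ∀ (n : Nat) (init : List Int), n ≤ init.length →
    (List.range n).foldl (fun l r => l.set r (φ r)) init
      = (List.range n).map φ ++ init.drop n := by
  intro n
  induction n with
  | zero => simp
  | succ m ih =>
    intro init hlen
    rw [List.range_succ, List.foldl_append, ih init (by omega)]
    simp only [List.foldl_cons, List.foldl_nil, List.map_append]
    have hm : m < init.length := by omega
    rw [List.drop_eq_getElem_cons hm]
    rw [List.set_append_right _ _ (by simp)]
    simp only [List.length_map, List.length_range, Nat.sub_self, List.set_cons_zero,
      List.map_cons, List.map_nil, List.append_assoc, List.cons_append, List.nil_append]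

-- A length-m window of l, read off by getD.
theorem pv_window (l : List Int) (a m : Nat) (h : a + m ≤ l.length) :
    (l.drop a).take m = (List.range m).map (fun r => l.getD (a + r) 0) := by
  apply List.ext_getElem
  · simp; omega
  · intro i h1 h2
    have hi : i < m := by simp at h1; omega
    simp [List.getD_eq_getElem?_getD, List.getElem?_eq_getElem (by omega : a + i < l.length)]

-- Accumulating the k stored columns by element-wise addition yields, in row r,
-- the sum over c < k of matrix[c*h + r].
theorem pv_col_fold (matrix : List Int) (h : Nat) : ∀ (k : Nat), k * h ≤ matrix.length →
    (List.range k).foldl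
        (fun res c => ((res.zip ((matrix.drop (c*h)).take h)).map (fun p => p.1 + p.2)))
        (List.replicate h 0)
      = (List.range h).map
          (fun r => ((List.range k).map (fun c => matrix.getD (c*h + r) 0)).sum) := by
  intro k
  induction k with
  | zero =>
    intro _
    apply List.ext_getElem <;> simp
  | succ m ih =>
    intro hlen
    have hmh : (m+1) * h = m * h + h := by ring
    have hm : m * h ≤ matrix.length := by omega
    rw [List.range_succ, List.foldl_append, ih hm]
    simp only [List.foldl_cons, List.foldl_nil]
    rw [pv_window matrix (m*h) h (by omega)]
    rw [List.zip_map']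
    rw [List.map_map]
    apply List.map_congr_left
    intro r _
    simp

theorem cm_row_sums_spec : Claim_equal_cm_row_sums := by
  intro matrix width _ hw
  unfold Spec_cm_row_sums
  rcases lt_or_gt_of_ne (by simpa [Pre_cm_row_sums] using hw : width ≠ 0) with hneg | hpos
  · -- width < 0 : height ≤ 0, both sides are []
    have hH : PySem.Int.floordiv (matrix.length : Int) width ≤ 0 := by
      by_contra hcon
      replace hcon : 0 < PySem.Int.floordiv (matrix.length : Int) width := lt_of_not_ge hcon
      have hmod := (PySem.Int.mod_neg_bounds (a := (matrix.length : Int)) hneg).2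
      have heq := PySem.Int.floordiv_mul_add_mod (matrix.length : Int) width
      have hprod : PySem.Int.floordiv (matrix.length : Int) width * width < 0 :=
        mul_neg_of_pos_of_neg hcon hneg
      have : (0 : Int) ≤ (matrix.length : Int) := by positivity
      omega
    have hBnil : cm_row_sums_alt matrix width = [] := by
      simp [cm_row_sums_alt, hH]
    rw [hBnil]
    simp [cm_row_sums, PySem.List.pyRange_one, Int.toNat_of_nonpos hH]
  · -- width > 0
    have hww : ((width.toNat : Nat) : Int) = width := Int.toNat_of_nonneg hpos.le
    set w := width.toNat with hwdef
    set n := matrix.length with hndef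
    have hH : PySem.Int.floordiv (n : Int) width = ((n / w : Nat) : Int) := by
      rw [← hww]; exact PySem.Int.floordiv_natCast n w
    set h := n / w with hhdef
    have hhw : w * h ≤ n := by
      have := Nat.div_mul_le_self n w
      calc w * h = h * w := Nat.mul_comm w h
        _ ≤ n := this
    have hA : cm_row_sums matrix width
        = (List.range h).map
            (fun r => ((List.range w).map (fun c => matrix.getD (r + c*h) 0)).sum) := by
      simp only [cm_row_sums, ← hndef, hH]
      rw [← hww]
      simp only [PySem.List.pyRange_one, sub_zero, Int.toNat_natCast, zero_add]
      rw [List.foldl_map]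
      have hrow : ∀ (r : Nat),
          List.foldl (fun (suma : Int) (col : Int) =>
              suma + PySem.List.pyGetD matrix ((r : Int) + col * ((h : Nat) : Int)) 0) 0
            (List.map (fun k => ((k : Nat) : Int)) (List.range w))
          = ((List.range w).map (fun c => matrix.getD (r + c*h) 0)).sum := by
        intro r
        rw [List.foldl_map, PySem.List.foldl_add, zero_add]
        apply congrArg
        apply List.map_congr_left
        intro c _
        have hcast : (r : Int) + (c : Int) * ((h : Nat) : Int) = ((r + c*h : Nat) : Int) := by
          push_cast; ring
        rw [hcast, PySem.List.pyGetD_natCast]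
      simp only [hrow, Int.toNat_natCast]
      rw [pv_set_fold _ h (List.replicate h 0) (by simp)]
      simp
    have hB : cm_row_sums_alt matrix width
        = (List.range h).map
            (fun r => ((List.range w).map (fun c => matrix.getD (c*h + r) 0)).sum) := by
      simp only [cm_row_sums_alt, ← hndef, hH]
      by_cases hh0 : h = 0
      · simp [hh0]
      · have hhpos : (0 : Int) < (h : Int) := by exact_mod_cast Nat.pos_of_ne_zero hh0
        rw [if_neg (not_le.mpr hhpos)]
        rw [← hww]
        simp only [PySem.List.pyRange_one, sub_zero, Int.toNat_natCast, zero_add]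
        rw [List.foldl_map]
        have hslice : ∀ (c : Nat),
            PySem.List.slice matrix (some ((c : Int) * ((h : Nat) : Int)))
                (some (((c : Int) + 1) * ((h : Nat) : Int)))
            = (matrix.drop (c*h)).take h := by
          intro c
          have h1 : (c : Int) * ((h : Nat) : Int) = ((c*h : Nat) : Int) := by push_cast; ring
          have h2 : ((c : Int) + 1) * ((h : Nat) : Int) = (((c+1)*h : Nat) : Int) := by
            push_cast; ring
          rw [h1, h2, PySem.List.slice_natCast]
          have h3 : (c+1)*h - c*h = h := by
            rw [Nat.succ_mul, Nat.add_sub_cancel_left]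
          rw [h3]
        simp only [hslice]
        exact pv_col_fold matrix h w (by rw [← hndef]; exact hhw)
    rw [hA, hB]
    apply List.map_congr_left
    intro r _
    apply congrArg
    apply List.map_congr_left
    intro c _
    rw [Nat.add_comm]
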